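-- pv_equiv track=rewrite | github.com/rsha256/bril | src/alias_analysis/global_constant_folding.py | meet
-- ===== SOURCE A (Python) =====
-- def meet(in_sets):
--     if not in_sets:
--         return {}
--     result = in_sets[0].copy()
--     for in_set in in_sets[1:]:
--         for var in list(result):
--             if var not in in_set or result[var] != in_set[var]:
--                 del result[var]
--     return result
-- ===== SOURCE B (Python) =====
-- def meet(in_sets):
--     n = len(in_sets)
--     counts = {}
--     for in_set in in_sets:
--         for pair in in_set.items():
--             counts[pair] = counts.get(pair, 0) + 1
--     return {var: val for (var, val), c in counts.items() if c == n}
-- ===== Notes on version B (the rewrite author's own statement) =====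
-- stated objective: alternative
-- what changed: Replaces the repeated destructive intersection (copy the first dict, then for each further dict delete disagreeing keys from the shrinking result) by a single tally: one combined pass counts every (var, value) pair across all dicts, then keeps exactly the pairs whose count equals len(in_sets).
import Mathlib
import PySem

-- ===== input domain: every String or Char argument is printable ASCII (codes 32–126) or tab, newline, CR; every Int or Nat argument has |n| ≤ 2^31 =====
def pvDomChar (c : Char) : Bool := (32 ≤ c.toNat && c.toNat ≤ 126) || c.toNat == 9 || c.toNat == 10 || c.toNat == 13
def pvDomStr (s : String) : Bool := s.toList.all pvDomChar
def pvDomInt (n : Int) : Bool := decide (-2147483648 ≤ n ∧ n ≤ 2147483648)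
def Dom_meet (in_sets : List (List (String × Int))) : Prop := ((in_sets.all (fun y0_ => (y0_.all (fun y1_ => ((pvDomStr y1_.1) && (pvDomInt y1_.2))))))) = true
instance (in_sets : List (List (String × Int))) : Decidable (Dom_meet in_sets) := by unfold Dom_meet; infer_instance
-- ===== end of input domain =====

-- B replaces A's repeated destructive intersection by one combined tally of (var, value)
-- pairs over all dicts, keeping the pairs counted len(in_sets) times (objective: alternative).

-- ===== PORT A =====
-- for var in list(result): if var not in in_set or result[var] != in_set[var]: del result[var]
-- ('result[var]' is ported as Dict.get?; under Pre_meet the key is always present, so the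
--  Python subscript never raises)
def meet (in_sets : List (List (String × Int))) : List (String × Int) :=
  match in_sets with
  | [] => []
  | s0 :: rest =>
    (rest.foldl (fun (result : PySem.Dict String Int) in_set =>
        result.keys.foldl (fun r var =>
          if !(PySem.Dict.contains ⟨in_set⟩ var)
              || !(PySem.Dict.get? r var == PySem.Dict.get? (⟨in_set⟩ : PySem.Dict String Int) var)
          then r.erase var else r) result)
      (⟨s0⟩ : PySem.Dict String Int)).items

-- ===== PORT B =====
def meet_alt (in_sets : List (List (String × Int))) : List (String × Int) :=
  let n : Int := in_sets.length
  let counts : PySem.Dict (String × Int) Int :=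
    in_sets.foldl (fun c in_set =>
      in_set.foldl (fun c pair => c.insert pair (c.getD pair 0 + 1)) c) PySem.Dict.empty
  (counts.items.foldl (fun r pc => if pc.2 = n then r.insert pc.1.1 pc.1.2 else r)
    (PySem.Dict.empty : PySem.Dict String Int)).items

-- ===== PRECONDITION & SPEC =====
-- A's inputs are Python dicts, whose keys are unique by construction; Pre_ states exactly that
-- for the association lists representing them (it excludes no representable Python input).
def Pre_meet (in_sets : List (List (String × Int))) : Prop :=
  ∀ s ∈ in_sets, (s.map Prod.fst).Nodup
instance (in_sets : List (List (String × Int))) : Decidable (Pre_meet in_sets) := by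
  unfold Pre_meet; infer_instance
def pvWitness_meet : (List (List (String × Int))) := [[("a", 1), ("b", 2)], [("b", 2), ("c", 3)]]
def Spec_meet (in_sets : List (List (String × Int))) (out : List (String × Int)) : Prop := out = meet_alt in_sets
instance (in_sets : List (List (String × Int))) (out : List (String × Int)) : Decidable (Spec_meet in_sets out) := by unfold Spec_meet; infer_instance

-- ===== CLAIM (what is proved, stated in full; the proofs are below) =====
def Claim_equal_meet : Prop := ∀ (in_sets : List (List (String × Int))), Dom_meet in_sets → Pre_meet in_sets → Spec_meet in_sets (meet in_sets)

-- ===== LEMMAS AND PROOFS =====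
-- helper used only by the proofs: the body of A's inner loop
def stepA (in_set : List (String × Int)) (r : PySem.Dict String Int) (var : String) : PySem.Dict String Int :=
  if !(PySem.Dict.contains ⟨in_set⟩ var)
      || !(PySem.Dict.get? r var == PySem.Dict.get? (⟨in_set⟩ : PySem.Dict String Int) var)
  then r.erase var else r

-- "pair p survives dict s" — A's keep-condition
def apred (s : List (String × Int)) (p : String × Int) : Bool :=
  PySem.Dict.get? (⟨s⟩ : PySem.Dict String Int) p.1 == some p.2

theorem meet_eq_foldl (s0 : List (String × Int)) (rest : List (List (String × Int))) :
    meet (s0 :: rest) =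
      (rest.foldl (fun (result : PySem.Dict String Int) in_set =>
          result.keys.foldl (stepA in_set) result) ⟨s0⟩).items := rfl

-- stepA at a key different from the head commutes with cons
theorem stepA_cons (s : List (String × Int)) (v : String) (x : Int)
    (r' : List (String × Int)) (k : String) (hk : v ≠ k) :
    stepA s ⟨(v, x) :: r'⟩ k = ⟨(v, x) :: (stepA s ⟨r'⟩ k).items⟩ := by
  have hbeq : (v == k) = false := by simp [hk]
  simp only [stepA, PySem.Dict.get?, PySem.Dict.erase,
    List.find?, List.filter, hbeq, Bool.not_false]
  split_ifs <;> rfl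

theorem foldl_stepA_cons (s : List (String × Int)) (v : String) (x : Int) :
    ∀ (ks : List String) (r' : List (String × Int)), v ∉ ks →
      ks.foldl (stepA s) ⟨(v, x) :: r'⟩ = ⟨(v, x) :: (ks.foldl (stepA s) ⟨r'⟩).items⟩ := by
  intro ks
  induction ks with
  | nil => intro r' _; rfl
  | cons k ks ih =>
      intro r' hv
      have hvk : v ≠ k := fun h => hv (h ▸ List.mem_cons_self)
      have hv' : v ∉ ks := fun h => hv (List.mem_cons_of_mem _ h)
      simp only [List.foldl_cons, stepA_cons s v x r' k hvk]
      exact ih _ hv'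

-- the erase branch at the head key drops exactly the head (keys are unique)
theorem erase_head (v : String) (x : Int) (r' : List (String × Int))
    (hv : v ∉ r'.map Prod.fst) :
    (PySem.Dict.erase (⟨(v, x) :: r'⟩ : PySem.Dict String Int) v) = ⟨r'⟩ := by
  simp only [PySem.Dict.erase, List.filter]
  simp only [beq_self_eq_true, Bool.not_true]
  congr 1
  rw [List.filter_eq_self]
  intro p hp
  have : p.1 ≠ v := by
    intro h
    exact hv (h ▸ List.mem_map_of_mem hp)
  simp [this]

-- A's inner loop = one filter
theorem inner_loop_eq_filter (s : List (String × Int)) :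
    ∀ (r : List (String × Int)), (r.map Prod.fst).Nodup →
      (r.map Prod.fst).foldl (stepA s) ⟨r⟩ = ⟨r.filter (apred s)⟩ := by
  intro r
  induction r with
  | nil => intro _; rfl
  | cons p r' ih =>
      obtain ⟨v, x⟩ := p
      intro hnd
      have hv : v ∉ r'.map Prod.fst := (List.nodup_cons.mp hnd).1
      have hnd' : (r'.map Prod.fst).Nodup := (List.nodup_cons.mp hnd).2
      have hget : PySem.Dict.get? (⟨(v, x) :: r'⟩ : PySem.Dict String Int) v = some x := by
        simp [PySem.Dict.get?, List.find?]
      by_cases hp : apred s (v, x) = true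
      · -- keep the head
        have hgs : PySem.Dict.get? (⟨s⟩ : PySem.Dict String Int) v = some x := by
          simpa [apred] using hp
        have hcont : PySem.Dict.contains (⟨s⟩ : PySem.Dict String Int) v = true := by
          rw [PySem.Dict.contains_eq_isSome_get?, hgs]; rfl
        have hstep : stepA s ⟨(v, x) :: r'⟩ v = ⟨(v, x) :: r'⟩ := by
          simp [stepA, hcont, hget, hgs]
        simp only [List.map_cons, List.foldl_cons, hstep]
        rw [foldl_stepA_cons s v x _ r' hv, ih hnd']
        simp [List.filter, hp]
      · -- delete the head
        have hgs : ¬ PySem.Dict.get? (⟨s⟩ : PySem.Dict String Int) v = some x := by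
          simpa [apred] using hp
        have hcond : (!(PySem.Dict.contains (⟨s⟩ : PySem.Dict String Int) v)
            || !(PySem.Dict.get? (⟨(v, x) :: r'⟩ : PySem.Dict String Int) v ==
                 PySem.Dict.get? (⟨s⟩ : PySem.Dict String Int) v)) = true := by
          rw [hget]
          have : (some x == PySem.Dict.get? (⟨s⟩ : PySem.Dict String Int) v) = false := by
            rw [beq_eq_false_iff_ne]
            exact fun h => hgs h.symm
          simp [this]
        have hstep : stepA s ⟨(v, x) :: r'⟩ v = ⟨r'⟩ := by
          rw [stepA, if_pos hcond, erase_head v x r' hv]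
        simp only [List.map_cons, List.foldl_cons, hstep]
        rw [ih hnd']
        have : apred s (v, x) = false := by simpa using hp
        simp [List.filter, this]

theorem nodup_keys_filter (r : List (String × Int)) (q : String × Int → Bool)
    (h : (r.map Prod.fst).Nodup) : ((r.filter q).map Prod.fst).Nodup :=
  h.sublist (List.Sublist.map _ (List.filter_sublist (l := r)))

theorem outer_loop_eq_filter :
    ∀ (rest : List (List (String × Int))) (r : List (String × Int)),
      (r.map Prod.fst).Nodup →
      (rest.foldl (fun (result : PySem.Dict String Int) in_set =>
          result.keys.foldl (stepA in_set) result) ⟨r⟩).items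
        = r.filter (fun p => rest.all (fun s => apred s p)) := by
  intro rest
  induction rest with
  | nil => intro r _; simp
  | cons s rest ih =>
      intro r hnd
      have hkeys : (PySem.Dict.keys (⟨r⟩ : PySem.Dict String Int)) = r.map Prod.fst := rfl
      simp only [List.foldl_cons, hkeys, inner_loop_eq_filter s r hnd]
      rw [ih _ (nodup_keys_filter r _ hnd)]
      rw [List.filter_filter]
      apply List.filter_congr
      intro p _
      simp [List.all_cons, Bool.and_comm]

theorem meetA_char (s0 : List (String × Int)) (rest : List (List (String × Int)))
    (hnd : (s0.map Prod.fst).Nodup) :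
    meet (s0 :: rest) = s0.filter (fun p => rest.all (fun s => apred s p)) := by
  rw [meet_eq_foldl]
  exact outer_loop_eq_filter rest s0 hnd

-- nested fold over the dicts = fold over the flattened pair list
theorem foldl_foldl_eq_flatMap {α β : Type} (g : β → α → β) :
    ∀ (l : List (List α)) (c : β),
      l.foldl (fun c s => s.foldl g c) c = (l.flatMap id).foldl g c := by
  intro l
  induction l with
  | nil => intro c; rfl
  | cons s l ih => intro c; simp [List.foldl_append, ih]

-- a guarded insert-fold is the insert-fold over the filtered list
theorem foldl_insert_guard (n : Int) :
    ∀ (l : List ((String × Int) × Int)) (d : PySem.Dict String Int),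
      l.foldl (fun r pc => if pc.2 = n then r.insert pc.1.1 pc.1.2 else r) d
        = (l.filter (fun pc => decide (pc.2 = n))).foldl
            (fun r pc => r.insert pc.1.1 pc.1.2) d := by
  intro l
  induction l with
  | nil => intro d; rfl
  | cons pc l ih =>
      intro d
      by_cases h : pc.2 = n
      · simp [List.filter, h, ih]
      · simp [List.filter, h, ih]

-- one dict contributes a pair at most once
theorem count_le_one_of_nodup_keys (s : List (String × Int))
    (h : (s.map Prod.fst).Nodup) (q : String × Int) : s.count q ≤ 1 := by
  have h1 : s.count q ≤ (s.map Prod.fst).count q.1 := by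
    simp only [List.count, List.countP_map]
    apply List.countP_mono_left
    intro a _ ha
    have : a = q := by simpa using ha
    simp [this]
  have h2 : (s.map Prod.fst).count q.1 ≤ 1 := List.nodup_iff_count_le_one.mp h q.1
  omega

theorem count_flatMap_le (q : String × Int) :
    ∀ (l : List (List (String × Int))), (∀ s ∈ l, s.count q ≤ 1) →
      (l.flatMap id).count q ≤ l.length := by
  intro l
  induction l with
  | nil => intro _; simp
  | cons s l ih =>
      intro h
      have hs := h s List.mem_cons_self
      have hl := ih (fun s hs => h s (List.mem_cons_of_mem _ hs))
      simp only [List.flatMap_cons, id, List.count_append, List.length_cons]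
      omega

theorem count_flatMap_eq_iff (q : String × Int) :
    ∀ (l : List (List (String × Int))), (∀ s ∈ l, s.count q ≤ 1) →
      ((l.flatMap id).count q = l.length ↔ ∀ s ∈ l, q ∈ s) := by
  intro l
  induction l with
  | nil => intro _; simp
  | cons s l ih =>
      intro h
      have hs := h s List.mem_cons_self
      have hl' : ∀ s ∈ l, s.count q ≤ 1 := fun s hs => h s (List.mem_cons_of_mem _ hs)
      have hle := count_flatMap_le q l hl'
      simp only [List.flatMap_cons, id, List.count_append, List.length_cons]
      constructor
      · intro he
        have h1 : s.count q = 1 := by omega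
        have h2 : (l.flatMap id).count q = l.length := by omega
        intro t ht
        rcases List.mem_cons.mp ht with rfl | ht
        · exact List.count_pos_iff.mp (by omega)
        · exact ((ih hl').mp h2) t ht
      · intro hall
        have h1 : 0 < s.count q := List.count_pos_iff.mpr (hall s List.mem_cons_self)
        have h2 : (l.flatMap id).count q = l.length :=
          (ih hl').mpr (fun t ht => hall t (List.mem_cons_of_mem _ ht))
        omega

theorem apred_iff_mem (s : List (String × Int)) (h : (s.map Prod.fst).Nodup)
    (p : String × Int) : apred s p = true ↔ p ∈ s := by
  have hk : (PySem.Dict.keys (⟨s⟩ : PySem.Dict String Int)).Nodup := h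
  rw [apred, beq_iff_eq, PySem.Dict.get?_eq_some_iff_mem_items _ _ _ hk]

-- "pair q has full count" — B's keep-condition
def cnt (in_sets : List (List (String × Int))) (q : String × Int) : Bool :=
  decide ((((in_sets.flatMap id).count q : Int)) = (in_sets.length : Int))

theorem mem_eq_of_keys_nodup (s : List (String × Int)) (h : (s.map Prod.fst).Nodup)
    (q1 q2 : String × Int) (h1 : q1 ∈ s) (h2 : q2 ∈ s) (he : q1.1 = q2.1) : q1 = q2 := by
  obtain ⟨a, b⟩ := q1
  obtain ⟨c, d⟩ := q2
  simp only at he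
  subst he
  have e1 := (PySem.Dict.get?_eq_some_iff_mem_items (⟨s⟩ : PySem.Dict String Int) a b h).mpr h1
  have e2 := (PySem.Dict.get?_eq_some_iff_mem_items (⟨s⟩ : PySem.Dict String Int) a d h).mpr h2
  rw [e1] at e2
  simp_all

theorem cnt_mem_all (in_sets : List (List (String × Int))) (hpre : Pre_meet in_sets)
    (q : String × Int) :
    cnt in_sets q = true ↔ ∀ s ∈ in_sets, q ∈ s := by
  have hle : ∀ s ∈ in_sets, s.count q ≤ 1 :=
    fun s hs => count_le_one_of_nodup_keys s (hpre s hs) q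
  rw [cnt, decide_eq_true_iff, Int.natCast_inj]
  exact count_flatMap_eq_iff q in_sets hle

theorem keys_nodup_filtered (in_sets : List (List (String × Int))) (hpre : Pre_meet in_sets) :
    (((PySem.Set.ofList (in_sets.flatMap id)).filter (cnt in_sets)).map Prod.fst).Nodup := by
  apply List.Nodup.map_on
  · intro q1 hq1 q2 hq2 he
    have m1 := (List.mem_filter.mp hq1)
    have m2 := (List.mem_filter.mp hq2)
    have hall1 := (cnt_mem_all in_sets hpre q1).mp m1.2
    have hall2 := (cnt_mem_all in_sets hpre q2).mp m2.2
    cases in_sets with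
    | nil =>
        have h0 : q1 ∈ ([] : List (List (String × Int))).flatMap id :=
          (PySem.Set.mem_ofList _ _).mp m1.1
        simp at h0
    | cons s0 rest =>
        exact mem_eq_of_keys_nodup s0 (hpre s0 List.mem_cons_self) q1 q2
          (hall1 s0 List.mem_cons_self) (hall2 s0 List.mem_cons_self) he
  · exact (PySem.Set.nodup_ofList _).filter _

theorem meetB_char (in_sets : List (List (String × Int))) (hpre : Pre_meet in_sets) :
    meet_alt in_sets = (PySem.Set.ofList (in_sets.flatMap id)).filter (cnt in_sets) := by
  rw [meet_alt]
  rw [foldl_foldl_eq_flatMap, PySem.Dict.foldl_insert_getD_add_one_eq_counter,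
    PySem.Dict.items_counter, foldl_insert_guard, List.filter_map, List.foldl_map]
  have hcomp : ((fun pc : (String × Int) × Int => decide (pc.2 = (in_sets.length : Int))) ∘
      (fun k : String × Int => (k, ((in_sets.flatMap id).count k : Int)))) = cnt in_sets := by
    funext q; simp [cnt]
  rw [hcomp]
  have := PySem.Dict.items_foldl_insert_fresh
    ((PySem.Set.ofList (in_sets.flatMap id)).filter (cnt in_sets))
    (fun q : String × Int => q.1) (fun q : String × Int => q.2)
    (PySem.Dict.empty : PySem.Dict String Int)
    (fun a _ => PySem.Dict.contains_empty a.1)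
    (keys_nodup_filtered in_sets hpre)
  simp only at this ⊢
  rw [this]
  simp [PySem.Dict.empty]

-- ===== VERDICT (by name: the statement is the Claim_ definition above) =====
theorem meet_spec : Claim_equal_meet := by
  intro in_sets _ hpre
  unfold Spec_meet
  cases in_sets with
  | nil => rfl
  | cons s0 rest =>
      have hnd0 : (s0.map Prod.fst).Nodup := hpre s0 List.mem_cons_self
      rw [meetA_char s0 rest hnd0, meetB_char _ hpre]
      have hflat : ((s0 :: rest).flatMap id) = s0 ++ rest.flatMap id := by simp
      rw [hflat, PySem.Set.ofList_append, PySem.Set.update_eq_append_filter,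
        PySem.Set.ofList_eq_self_of_nodup s0 (List.Nodup.of_map Prod.fst hnd0),
        List.filter_append]
      have hextra : List.filter (cnt (s0 :: rest))
          (List.filter (fun y => !(PySem.Set.contains s0 y))
            (PySem.Set.ofList (rest.flatMap id))) = [] := by
        rw [List.filter_eq_nil_iff]
        intro y hy
        have hy2 := (List.mem_filter.mp hy).2
        have hns : y ∉ s0 := by simpa using hy2
        by_contra hc
        have hc' : cnt (s0 :: rest) y = true := by simpa using hc
        exact hns (((cnt_mem_all _ hpre y).mp hc') s0 List.mem_cons_self)
      rw [hextra, List.append_nil]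
      apply List.filter_congr
      intro p hp
      rw [Bool.eq_iff_iff, List.all_eq_true, cnt_mem_all _ hpre p]
      constructor
      · intro h s hs
        rcases List.mem_cons.mp hs with rfl | hs
        · exact hp
        · exact (apred_iff_mem s (hpre s (List.mem_cons_of_mem _ hs)) p).mp (h s hs)
      · intro h s hs
        exact (apred_iff_mem s (hpre s (List.mem_cons_of_mem _ hs)) p).mpr
          (h s (List.mem_cons_of_mem _ hs))
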